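-- pv_equiv track=rewrite | github.com/Garmelon/yaboli | yaboli/command.py | _split_escaped
-- ===== SOURCE A (Python) =====
-- from typing import (Awaitable, Callable, Dict, List, NamedTuple, Optional,
--                     Pattern, Tuple)
--
-- def _split_escaped(text: str) -> List[str]:
--     """
--     Splits the string into individual arguments, while allowing
--     bash-inspired quoting/escaping.
--
--     A single backslash escapes the immediately following character.
--
--     Double quotes allow backslash escapes, but escape all other characters.
--
--     Single quotes escape all characters.
--
--     The remaining string is split at all unescaped while space characters
--     (using str.isspace), similar to str.split without any arguments.
--     """
--
--     words: List[str] = []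
--     word: List[str] = []
--
--     backslash = False
--     quotes: Optional[str] = None
--
--     for char in text:
--         if backslash:
--             backslash = False
--             word.append(char)
--         elif quotes is not None:
--             if quotes == "\"" and char == "\\":
--                 backslash = True
--             elif char == quotes:
--                 quotes = None
--             else:
--                 word.append(char)
--         elif char == "\\":
--             backslash = True
--         elif char in ["\"", "'"]:
--             quotes = char
--         elif char.isspace():
--             if word:
--                 words.append("".join(word))
--                 word = []
--         else:
--             word.append(char)
--
--     # ignoring any left-over backslashes or open quotes at the end
--
--     if word:
--         words.append("".join(word))
--
--     return words
-- ===== SOURCE B (Python) =====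
-- def _split_escaped(text: str) -> list:
--     """Index-based recursive-descent scanner: consumes backslash pairs and
--     whole quoted spans (inner loop) instead of a per-char flag state machine."""
--     words = []
--     word = []
--     i = 0
--     n = len(text)
--     while i < n:
--         c = text[i]
--         if c == "\\":
--             if i + 1 < n:
--                 word.append(text[i + 1])
--             i += 2
--         elif c == "\"" or c == "'":
--             i += 1
--             while i < n and text[i] != c:
--                 if c == "\"" and text[i] == "\\":
--                     if i + 1 < n:
--                         word.append(text[i + 1])
--                     i += 2
--                 else:
--                     word.append(text[i])
--                     i += 1
--             i += 1  # step past the closing quote (or past the end)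
--         elif c.isspace():
--             if word:
--                 words.append("".join(word))
--                 word = []
--             i += 1
--         else:
--             word.append(c)
--             i += 1
--     if word:
--         words.append("".join(word))
--     return words
-- ===== Notes on version B (the rewrite author's own statement) =====
-- stated objective: alternative
-- what changed: A is a single per-character fold over four pieces of mutable state (backslash flag, open-quote marker); B is an index-based recursive-descent scanner that consumes a backslash pair in one step and a whole quoted span in a dedicated inner loop, so it carries no cross-iteration flags.
import Mathlib
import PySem

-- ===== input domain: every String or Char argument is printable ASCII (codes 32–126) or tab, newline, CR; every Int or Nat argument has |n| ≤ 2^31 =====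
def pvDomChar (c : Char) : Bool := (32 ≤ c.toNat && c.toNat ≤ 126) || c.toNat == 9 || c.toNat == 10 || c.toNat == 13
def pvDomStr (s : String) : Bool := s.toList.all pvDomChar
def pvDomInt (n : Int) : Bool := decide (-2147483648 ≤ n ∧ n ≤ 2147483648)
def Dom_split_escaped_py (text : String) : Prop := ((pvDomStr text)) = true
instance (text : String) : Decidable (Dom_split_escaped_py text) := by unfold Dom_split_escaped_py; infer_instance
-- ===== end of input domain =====

-- B replaces A's per-character fold carrying backslash/quote flags by an index-based
-- recursive-descent scanner that consumes escape pairs and whole quoted spans; same cost (alternative).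

-- ===== PORT A =====
-- one step of A's for-loop: state = (words, word, backslash, quotes)
def pvStepA (st : List String × List Char × Bool × Option Char) (c : Char) :
    List String × List Char × Bool × Option Char :=
  match st with
  | (words, word, backslash, quotes) =>
    if backslash then (words, word ++ [c], false, quotes)
    else
      match quotes with
      | some q =>
        if q = '"' ∧ c = '\\' then (words, word, true, some q)
        else if c = q then (words, word, false, none)
        else (words, word ++ [c], false, some q)
      | none =>
        if c = '\\' then (words, word, true, none)
        else if c = '"' ∨ c = '\'' then (words, word, false, some c)
        else if PySem.Chars.isspace c then
          (if word = [] then words else words ++ [String.ofList word], [], false, none)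
        else (words, word ++ [c], false, none)

def split_escaped_py (text : String) : List String :=
  match text.toList.foldl pvStepA ([], [], false, none) with
  | (words, word, _, _) => if word = [] then words else words ++ [String.ofList word]

-- ===== PORT B =====
-- B's inner while loop: consume a span quoted by q, return (extended word, remaining input)
def pvScanQ (q : Char) : List Char → List Char → List Char × List Char
  | [], word => (word, [])
  | c :: rest, word =>
    if c = q then (word, rest)
    else if q = '"' ∧ c = '\\' then
      match rest with
      | [] => (word, [])
      | d :: rest' => pvScanQ q rest' (word ++ [d])
    else pvScanQ q rest (word ++ [c])

-- termination fact for pvScanB's quoted-span jump (cited in decreasing_by)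
theorem pvScanQ_snd_length_le (q : Char) (cs word : List Char) :
    (pvScanQ q cs word).2.length ≤ cs.length := by
  fun_induction pvScanQ q cs word <;> simp_all <;> omega

-- B's outer while loop
def pvScanB : List Char → List Char → List String → List String
  | [], word, words => if word = [] then words else words ++ [String.ofList word]
  | c :: rest, word, words =>
    if c = '\\' then
      match rest with
      | [] => pvScanB [] word words
      | d :: rest' => pvScanB rest' (word ++ [d]) words
    else if c = '"' ∨ c = '\'' then
      pvScanB (pvScanQ c rest word).2 (pvScanQ c rest word).1 words
    else if PySem.Chars.isspace c then
      pvScanB rest [] (if word = [] then words else words ++ [String.ofList word])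
    else pvScanB rest (word ++ [c]) words
termination_by cs _ _ => cs.length
decreasing_by
  · simp only [List.length_nil, List.length_cons]; omega
  · simp only [List.length_cons]; omega
  · have := pvScanQ_snd_length_le c rest word
    simp only [List.length_cons]; omega
  · simp only [List.length_cons]; omega
  · simp only [List.length_cons]; omega

def split_escaped_py_alt (text : String) : List String := pvScanB text.toList [] []

-- ===== PRECONDITION & SPEC =====
def Spec_split_escaped_py (text : String) (out : List String) : Prop := out = split_escaped_py_alt text
instance (text : String) (out : List String) : Decidable (Spec_split_escaped_py text out) := by unfold Spec_split_escaped_py; infer_instance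

-- ===== CLAIM (what is proved, stated in full; the proofs are below) =====
def Claim_equal_split_escaped_py : Prop := ∀ (text : String), Dom_split_escaped_py text → Spec_split_escaped_py text (split_escaped_py text)

-- ===== LEMMAS AND PROOFS =====

-- A's post-loop flush, applied to a fold state
def pvFinish (st : List String × List Char × Bool × Option Char) : List String :=
  match st with
  | (words, word, _, _) => if word = [] then words else words ++ [String.ofList word]

-- A's fold from the open-quote state equals scanning the quoted span with pvScanQ
-- and resuming the fold from the normal state on the remainder.
theorem pvFold_quote (q : Char) (cs word : List Char) (words : List String) :
    pvFinish (cs.foldl pvStepA (words, word, false, some q)) =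
      pvFinish ((pvScanQ q cs word).2.foldl pvStepA
        (words, (pvScanQ q cs word).1, false, none)) := by
  fun_induction pvScanQ q cs word with
  | case1 word => simp [pvFinish]
  | case2 rest word =>
      have hne : ¬ (q = '"' ∧ q = '\\') := by
        rintro ⟨hq, hc⟩; rw [hq] at hc; exact absurd hc (by decide)
      simp [pvStepA, hne]
  | case3 c word h h2 =>
      simp [h2, pvStepA, pvFinish]
  | case4 c word h h2 d rest' ih =>
      simpa [pvStepA, h, h2] using ih
  | case5 c rest word h h2 ih =>
      simpa [pvStepA, h, h2] using ih

-- main invariant: A's fold from the normal state, followed by the flush, is B's scanner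
theorem pvFold_eq_scanB (n : Nat) :
    ∀ cs : List Char, cs.length ≤ n → ∀ (word : List Char) (words : List String),
      pvFinish (cs.foldl pvStepA (words, word, false, none)) = pvScanB cs word words := by
  induction n with
  | zero =>
      intro cs hcs word words
      have : cs = [] := List.eq_nil_of_length_eq_zero (Nat.le_zero.mp hcs)
      subst this; simp [pvFinish, pvScanB]
  | succ n ih =>
      intro cs hcs word words
      match cs with
      | [] => simp [pvFinish, pvScanB]
      | c :: rest =>
        by_cases hb : c = '\\'
        · subst hb
          match rest with
          | [] => simp [pvStepA, pvFinish, pvScanB]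
          | d :: rest' =>
            have hlen : rest'.length ≤ n := by simp at hcs; omega
            simp only [pvScanB]
            rw [← ih rest' hlen (word ++ [d]) words]
            simp [pvStepA]
        · by_cases hq : c = '"' ∨ c = '\''
          · have hlen : (pvScanQ c rest word).2.length ≤ n := by
              have := pvScanQ_snd_length_le c rest word
              simp at hcs; omega
            have hrhs : pvScanB (c :: rest) word words
                = pvScanB (pvScanQ c rest word).2 (pvScanQ c rest word).1 words := by
              rw [pvScanB.eq_def]; simp [hb, hq]
            rw [hrhs, ← ih _ hlen (pvScanQ c rest word).1 words, ← pvFold_quote]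
            simp [pvStepA, hb, hq]
          · have hlen : rest.length ≤ n := by simp at hcs; omega
            by_cases hs : PySem.Chars.isspace c = true
            · have hrhs : pvScanB (c :: rest) word words
                  = pvScanB rest [] (if word = [] then words else words ++ [String.ofList word]) := by
                rw [pvScanB.eq_def]; simp [hb, hq, hs]
              rw [hrhs, ← ih rest hlen [] _]
              simp [pvStepA, hb, hq, hs]
            · have hrhs : pvScanB (c :: rest) word words
                  = pvScanB rest (word ++ [c]) words := by
                rw [pvScanB.eq_def]; simp [hb, hq, hs]
              rw [hrhs, ← ih rest hlen (word ++ [c]) words]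
              simp [pvStepA, hb, hq, hs]

-- ===== VERDICT (by name: the statement is the Claim_ definition above) =====
theorem split_escaped_py_spec : Claim_equal_split_escaped_py := by
  intro text _
  show split_escaped_py text = split_escaped_py_alt text
  have h := pvFold_eq_scanB text.toList.length text.toList (Nat.le_refl _) [] []
  simpa [split_escaped_py, split_escaped_py_alt, pvFinish] using h
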